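-- pv_equiv track=rewrite | github.com/EndaltsevaAR/YandexTaskPy | lectures/_02_search/min_even.py | min_even
-- ===== SOURCE A (Python) =====
-- def min_even(seq):
--     answer = -1
--     flag = False
--     for i in range(len(seq)):
--         if seq[i] % 2 == 0 and (not flag or seq[i] < answer):
--             answer = seq[i]
--             flag = True
--     return answer
-- ===== SOURCE B (Python) =====
-- def min_even(seq):
--     evens = [x for x in seq if x % 2 == 0]
--     return min(evens) if evens else -1
-- ===== Notes on version B (the rewrite author's own statement) =====
-- stated objective: idiomatic
-- what changed: Replaces the index loop with answer/flag accumulator state by a filter of the even elements followed by the builtin min with -1 for the empty case.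
import Mathlib
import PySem

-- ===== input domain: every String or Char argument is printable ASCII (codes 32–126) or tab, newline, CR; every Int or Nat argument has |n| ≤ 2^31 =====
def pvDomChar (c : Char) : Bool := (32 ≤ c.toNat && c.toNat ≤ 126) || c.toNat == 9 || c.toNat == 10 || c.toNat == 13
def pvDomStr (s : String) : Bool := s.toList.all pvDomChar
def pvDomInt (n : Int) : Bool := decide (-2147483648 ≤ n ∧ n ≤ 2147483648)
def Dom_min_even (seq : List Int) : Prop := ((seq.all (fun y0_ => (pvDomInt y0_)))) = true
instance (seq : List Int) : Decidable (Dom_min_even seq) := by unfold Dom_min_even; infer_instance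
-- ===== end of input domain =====

-- B replaces A's fused answer/flag accumulator loop by filter-the-evens then builtin min (default -1); idiomatic, same cost.


-- ===== PORT A =====
def min_even (seq : List Int) : Int :=
  (((PySem.List.pyRange 0 (seq.length : Int) 1).foldl
    (fun (s : Int × Bool) i =>
      if PySem.Int.mod (PySem.List.pyGetD seq i 0) 2 = 0 ∧ (s.2 = false ∨ PySem.List.pyGetD seq i 0 < s.1)
      then (PySem.List.pyGetD seq i 0, true) else s)
    (-1, false))).1

-- ===== PORT B =====
def min_even_alt (seq : List Int) : Int :=
  let evens := seq.filter (fun x => decide (PySem.Int.mod x 2 = 0))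
  (PySem.List.min? evens (fun y => y)).getD (-1)

-- ===== PRECONDITION & SPEC =====
def Spec_min_even (seq : List Int) (out : Int) : Prop := out = min_even_alt seq
instance (seq : List Int) (out : Int) : Decidable (Spec_min_even seq out) := by unfold Spec_min_even; infer_instance

-- ===== CLAIM (what is proved, stated in full; the proofs are below) =====
def Claim_equal_min_even : Prop := ∀ (seq : List Int), Dom_min_even seq → Spec_min_even seq (min_even seq)

-- ===== LEMMAS AND PROOFS =====

-- A's loop body, abstracted over the current element
def pvStep (s : Int × Bool) (x : Int) : Int × Bool :=
  if PySem.Int.mod x 2 = 0 ∧ (s.2 = false ∨ x < s.1) then (x, true) else s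

def pvEv (x : Int) : Bool := decide (PySem.Int.mod x 2 = 0)

theorem pvStep_flag (a x : Int) : pvStep (a, true) x = (if pvEv x then min a x else a, true) := by
  unfold pvStep pvEv
  by_cases h : PySem.Int.mod x 2 = 0
  · rw [decide_eq_true h]
    by_cases hx : x < a
    · rw [if_pos ⟨h, Or.inr hx⟩, if_pos rfl, min_eq_right hx.le]
    · rw [if_neg (fun hc => hc.2.elim (fun he => Bool.noConfusion he) hx), if_pos rfl,
        min_eq_left (by omega : a ≤ x)]
  · rw [decide_eq_false h, if_neg (fun hc => h hc.1)]
    simp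

-- once the flag is set, the loop is a running min over the even elements
theorem pvStep_true (l : List Int) (a : Int) :
    l.foldl pvStep (a, true) = ((l.filter pvEv).foldl min a, true) := by
  induction l generalizing a with
  | nil => rfl
  | cons x t ih =>
    rw [List.foldl_cons, pvStep_flag, List.filter_cons]
    cases hv : pvEv x
    · simp only [Bool.false_eq_true, if_false, ih]
    · simp only [if_true, List.foldl_cons, ih]

theorem pvLoop_char (l : List Int) :
    l.foldl pvStep (-1, false) =
      match l.filter pvEv with
      | [] => ((-1 : Int), false)
      | h :: t => (t.foldl min h, true) := by
  induction l with
  | nil => rfl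
  | cons x t ih =>
    rw [List.foldl_cons, List.filter_cons]
    by_cases h : PySem.Int.mod x 2 = 0
    · have hv : pvEv x = true := decide_eq_true h
      have hs : pvStep (-1, false) x = (x, true) := by
        unfold pvStep; rw [if_pos ⟨h, Or.inl rfl⟩]
      simp only [hv, if_true, hs, pvStep_true]
    · have hv : pvEv x = false := decide_eq_false h
      have hs : pvStep (-1, false) x = (-1, false) := by
        unfold pvStep; rw [if_neg (fun hc => h hc.1)]
      simp only [hv, Bool.false_eq_true, if_false, hs, ih]

-- ===== VERDICT (by name: the statement is the Claim_ definition above) =====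
theorem min_even_spec : Claim_equal_min_even := by
  intro seq _
  show min_even seq = min_even_alt seq
  have hA : min_even seq = (seq.foldl pvStep (-1, false)).1 := by
    unfold min_even
    rw [show (fun (s : Int × Bool) i =>
          if PySem.Int.mod (PySem.List.pyGetD seq i 0) 2 = 0 ∧ (s.2 = false ∨ PySem.List.pyGetD seq i 0 < s.1)
          then (PySem.List.pyGetD seq i 0, true) else s)
        = (fun (s : Int × Bool) i => pvStep s (PySem.List.pyGetD seq i 0)) from rfl]
    rw [PySem.List.foldl_pyRange_zero_pyGetD' seq 0 pvStep ((-1 : Int), false)]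
  have hB : min_even_alt seq = (PySem.List.min? (seq.filter pvEv) (fun y => y)).getD (-1) := rfl
  rw [hA, hB, pvLoop_char]
  cases hf : seq.filter pvEv with
  | nil => simp [PySem.List.min?]
  | cons h t => simp [PySem.List.min?_id_cons]
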